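-- pv_equiv track=rewrite | github.com/CDBiddulph/scaffold-learning | experiments/keep_crosswords_20250711_195402/scaffolds/1-2/scaffold.py | find_clue_positions
-- ===== SOURCE A (Python) =====
-- def find_clue_positions(grid):
--     """Find the starting positions of all clues in the grid"""
--     height = len(grid)
--     width = len(grid[0]) if height > 0 else 0
--
--     positions = {}  # clue_num -> [(row, col, direction, length)]
--     current_num = 1
--
--     for row in range(height):
--         for col in range(width):
--             # Skip black squares
--             if grid[row][col] == '.':
--                 continue
--
--             # Check if this position starts a word
--             starts_across = (
--                 (col == 0 or grid[row][col - 1] == '.')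
--                 and col + 1 < width
--                 and grid[row][col + 1] != '.'
--             )
--             starts_down = (
--                 (row == 0 or grid[row - 1][col] == '.')
--                 and row + 1 < height
--                 and grid[row + 1][col] != '.'
--             )
--
--             if starts_across or starts_down:
--                 if current_num not in positions:
--                     positions[current_num] = []
--
--                 if starts_across:
--                     # Calculate length
--                     length = 0
--                     for c in range(col, width):
--                         if grid[row][c] == '.':
--                             break
--                         length += 1
--                     positions[current_num].append((row, col, 'across', length))
--
--                 if starts_down:
--                     # Calculate length
--                     length = 0
--                     for r in range(row, height):
--                         if grid[r][col] == '.':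
--                             break
--                         length += 1
--                     positions[current_num].append((row, col, 'down', length))
--
--                 current_num += 1
--
--     return positions
-- ===== SOURCE B (Python) =====
-- def find_clue_positions(grid):
--     """Find the starting positions of all clues in the grid"""
--     height = len(grid)
--     width = len(grid[0]) if height > 0 else 0
--     rows = [g[:width] for g in grid]
--
--     # across[r][c] = length of the run of non-'.' cells starting at (r, c) going right
--     across = [[0] * width for _ in range(height)]
--     for r in range(height):
--         for c in range(width - 1, -1, -1):
--             if rows[r][c] != '.':
--                 across[r][c] = (across[r][c + 1] if c + 1 < width else 0) + 1
--
--     # down[r][c] = length of the run of non-'.' cells starting at (r, c) going down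
--     down = [[0] * width for _ in range(height)]
--     for r in range(height - 1, -1, -1):
--         for c in range(width):
--             if rows[r][c] != '.':
--                 down[r][c] = (down[r + 1][c] if r + 1 < height else 0) + 1
--
--     positions = {}
--     num = 1
--     for r in range(height):
--         for c in range(width):
--             if rows[r][c] == '.':
--                 continue
--             sa = (c == 0 or rows[r][c - 1] == '.') and across[r][c] >= 2
--             sd = (r == 0 or rows[r - 1][c] == '.') and down[r][c] >= 2
--             if sa or sd:
--                 entries = []
--                 if sa:
--                     entries.append((r, c, 'across', across[r][c]))
--                 if sd:
--                     entries.append((r, c, 'down', down[r][c]))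
--                 positions[num] = entries
--                 num += 1
--     return positions
-- ===== Notes on version B (the rewrite author's own statement) =====
-- stated objective: alternative
-- what changed: Replaced A's per-start inner rightward/downward length scans with two precomputed run-length tables built by one reverse pass per direction, so each clue's length becomes a table lookup.
import Mathlib
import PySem

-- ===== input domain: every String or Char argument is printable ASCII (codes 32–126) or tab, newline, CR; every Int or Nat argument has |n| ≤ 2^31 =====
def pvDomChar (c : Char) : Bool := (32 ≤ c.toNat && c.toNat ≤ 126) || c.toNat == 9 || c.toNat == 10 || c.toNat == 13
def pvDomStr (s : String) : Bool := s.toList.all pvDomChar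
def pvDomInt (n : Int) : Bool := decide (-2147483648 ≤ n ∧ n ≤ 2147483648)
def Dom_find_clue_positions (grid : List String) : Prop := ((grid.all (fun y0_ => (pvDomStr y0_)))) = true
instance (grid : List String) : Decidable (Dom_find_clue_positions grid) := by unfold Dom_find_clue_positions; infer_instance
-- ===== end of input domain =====

-- B replaces A's per-start inner length scans by two precomputed run-length tables, built by one
-- reverse pass per direction, and reads each clue length from them; return values proved equal.

-- ===== PORT A =====
-- grid[r][c] (indices are the loop counters, always ≥ 0, in range inside Pre_)
def pvCell (g : List (List Char)) (r c : Nat) : Char := (g.getD r []).getD c ' '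

-- A's inner across-length loop: 'for c in range(col, width): if grid[row][c]=='.': break; length += 1'
def pvRunA (row : List Char) (c w : Nat) : Nat :=
  if _h : c < w then
    if row.getD c ' ' = '.' then 0 else pvRunA row (c+1) w + 1
  else 0
  termination_by w - c

-- A's inner down-length loop
def pvRunD (g : List (List Char)) (r c h : Nat) : Nat :=
  if _h : r < h then
    if pvCell g r c = '.' then 0 else pvRunD g (r+1) c h + 1
  else 0
  termination_by h - r

-- one iteration of A's double loop body, state = (positions dict, current_num)
def pvStepA (g : List (List Char)) (width height r c : Nat)
    (st : PySem.Dict Int (List (Int × Int × String × Int)) × Int) :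
    PySem.Dict Int (List (Int × Int × String × Int)) × Int :=
  if pvCell g r c = '.' then st
  else
    let sa : Bool := (c == 0 || pvCell g r (c-1) == '.') && (decide (c+1 < width)) && (pvCell g r (c+1) != '.')
    let sd : Bool := (r == 0 || pvCell g (r-1) c == '.') && (decide (r+1 < height)) && (pvCell g (r+1) c != '.')
    if sa || sd then
      let p0 := if st.1.contains st.2 then st.1 else st.1.insert st.2 []
      -- positions[current_num].append(e)  ≡  overwrite with the extended list
      let p1 := if sa then p0.insert st.2 (p0.getD st.2 [] ++ [((r:Int), (c:Int), "across", (pvRunA (g.getD r []) c width : Int))]) else p0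
      let p2 := if sd then p1.insert st.2 (p1.getD st.2 [] ++ [((r:Int), (c:Int), "down", (pvRunD g r c height : Int))]) else p1
      (p2, st.2 + 1)
    else st

def find_clue_positions (grid : List String) : List (Int × List (Int × Int × String × Int)) :=
  let height := grid.length
  let width := match grid with | [] => 0 | r :: _ => r.toList.length
  let g := grid.map String.toList
  (((List.range height).foldl (fun st r =>
      (List.range width).foldl (fun st c => pvStepA g width height r c st) st)
    (PySem.Dict.empty, (1 : Int))).1).items

-- ===== PORT B =====
-- 'for c in range(width-1, -1, -1): across[c] = across[c+1]+1 if cell != "." else 0', built right-to-left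
def pvAcrossRow : List Char → List Nat
  | [] => []
  | ch :: rest =>
      let t := pvAcrossRow rest
      (if ch = '.' then 0 else t.headD 0 + 1) :: t

-- 'for r in range(height-1, -1, -1): down[r][c] = down[r+1][c]+1 …', built bottom-up
def pvDownTable : List (List Char) → List (List Nat)
  | [] => []
  | row :: rest =>
      let t := pvDownTable rest
      let next := t.headD []
      ((List.range row.length).map (fun c => if row.getD c ' ' = '.' then 0 else next.getD c 0 + 1)) :: t

-- one iteration of B's main loop body
def pvStepB (rows : List (List Char)) (acr dwn : List (List Nat)) (r c : Nat)
    (st : PySem.Dict Int (List (Int × Int × String × Int)) × Int) :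
    PySem.Dict Int (List (Int × Int × String × Int)) × Int :=
  if (rows.getD r []).getD c ' ' = '.' then st
  else
    let av := (acr.getD r []).getD c 0
    let dv := (dwn.getD r []).getD c 0
    let sa : Bool := (c == 0 || (rows.getD r []).getD (c-1) ' ' == '.') && decide (2 ≤ av)
    let sd : Bool := (r == 0 || (rows.getD (r-1) []).getD c ' ' == '.') && decide (2 ≤ dv)
    if sa || sd then
      (st.1.insert st.2 ((if sa then [((r:Int), (c:Int), "across", (av:Int))] else []) ++
                         (if sd then [((r:Int), (c:Int), "down", (dv:Int))] else [])), st.2 + 1)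
    else st

def find_clue_positions_alt (grid : List String) : List (Int × List (Int × Int × String × Int)) :=
  let height := grid.length
  let width := match grid with | [] => 0 | r :: _ => r.toList.length
  let rows := grid.map (fun s => s.toList.take width)
  let acr := rows.map pvAcrossRow
  let dwn := pvDownTable rows
  (((List.range height).foldl (fun st r =>
      (List.range width).foldl (fun st c => pvStepB rows acr dwn r c st) st)
    (PySem.Dict.empty, (1 : Int))).1).items

-- ===== PRECONDITION & SPEC =====
-- Pre_ excludes exactly the ragged grids (a row shorter than row 0) on which A raises IndexError.
def Pre_find_clue_positions (grid : List String) : Prop :=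
  ∀ s ∈ grid, (grid.headD "").toList.length ≤ s.toList.length
instance (grid : List String) : Decidable (Pre_find_clue_positions grid) := by
  unfold Pre_find_clue_positions; infer_instance

def pvWitness_find_clue_positions : List String := ["AB.", "C.D", "EFG"]

def Spec_find_clue_positions (grid : List String) (out : List (Int × List (Int × Int × String × Int))) : Prop := out = find_clue_positions_alt grid
instance (grid : List String) (out : List (Int × List (Int × Int × String × Int))) : Decidable (Spec_find_clue_positions grid out) := by unfold Spec_find_clue_positions; infer_instance

-- ===== CLAIM (what is proved, stated in full; the proofs are below) =====
def Claim_equal_find_clue_positions : Prop := ∀ (grid : List String), Dom_find_clue_positions grid → Pre_find_clue_positions grid → Spec_find_clue_positions grid (find_clue_positions grid)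

-- ===== LEMMAS AND PROOFS =====
-- generic helpers
theorem pv_headD_getD {α : Type} (xs : List α) (d : α) : xs.headD d = xs.getD 0 d := by
  cases xs <;> rfl

theorem pv_map_getD_nil {α β : Type} (f : List α → List β) (hf : f [] = [])
    (g : List (List α)) (r : Nat) : (g.map f).getD r [] = f (g.getD r []) := by
  induction g generalizing r with
  | nil => simp [List.getD, hf]
  | cons a t ih =>
    cases r with
    | zero => rfl
    | succ r => simpa using ih r

theorem pv_take_getD (l : List Char) (w c : Nat) (hc : c < w) :
    (l.take w).getD c ' ' = l.getD c ' ' := by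
  simp [List.getD, List.getElem?_take_of_lt hc]

theorem pvRunA_eq (row : List Char) (c w : Nat) :
    pvRunA row c w =
      if c < w then (if row.getD c ' ' = '.' then 0 else pvRunA row (c+1) w + 1) else 0 := by
  rw [pvRunA, dite_eq_ite]

theorem pvRunD_eq (g : List (List Char)) (r c h : Nat) :
    pvRunD g r c h =
      if r < h then (if pvCell g r c = '.' then 0 else pvRunD g (r+1) c h + 1) else 0 := by
  rw [pvRunD, dite_eq_ite]

-- run-length facts
theorem pvRunA_shift (ch : Char) (rest : List Char) :
    ∀ (n c w : Nat), w - c ≤ n → pvRunA (ch :: rest) (c+1) (w+1) = pvRunA rest c w := by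
  intro n
  induction n with
  | zero =>
    intro c w h
    conv_lhs => rw [pvRunA_eq]
    conv_rhs => rw [pvRunA_eq]
    rw [if_neg (by omega), if_neg (by omega)]
  | succ n ih =>
    intro c w h
    conv_lhs => rw [pvRunA_eq]
    conv_rhs => rw [pvRunA_eq]
    by_cases hc : c < w
    · rw [if_pos (by omega : c + 1 < w + 1), if_pos hc, List.getD_cons_succ,
        ih (c+1) w (by omega)]
    · rw [if_neg (by omega), if_neg hc]

theorem pvRunA_congr (w : Nat) (l1 l2 : List Char)
    (hcell : ∀ i, i < w → l1.getD i ' ' = l2.getD i ' ') :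
    ∀ (n c : Nat), w - c ≤ n → pvRunA l1 c w = pvRunA l2 c w := by
  intro n
  induction n with
  | zero =>
    intro c h
    conv_lhs => rw [pvRunA_eq]
    conv_rhs => rw [pvRunA_eq]
    rw [if_neg (by omega), if_neg (by omega)]
  | succ n ih =>
    intro c h
    conv_lhs => rw [pvRunA_eq]
    conv_rhs => rw [pvRunA_eq]
    by_cases hc : c < w
    · rw [if_pos hc, if_pos hc, hcell c hc, ih (c+1) (by omega)]
    · rw [if_neg hc, if_neg hc]

theorem pvRunA_pos (l : List Char) (c w : Nat) :
    1 ≤ pvRunA l c w ↔ (c < w ∧ l.getD c ' ' ≠ '.') := by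
  rw [pvRunA_eq]
  by_cases h1 : c < w
  · rw [if_pos h1]
    by_cases h2 : l.getD c ' ' = '.'
    · rw [if_pos h2]; simp only [List.getD] at h2; simp [h1, h2]
    · rw [if_neg h2]; simp only [List.getD] at h2; simp [h1, h2]
  · rw [if_neg h1]; simp [h1]

theorem pv_acrossRow_getD (l : List Char) :
    ∀ c : Nat, (pvAcrossRow l).getD c 0 = pvRunA l c l.length := by
  induction l with
  | nil =>
    intro c
    rw [pvRunA_eq, if_neg (by simp)]
    simp [pvAcrossRow, List.getD]
  | cons ch rest ih =>
    intro c
    cases c with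
    | zero =>
      rw [pvRunA_eq, if_pos (by simp : 0 < (ch :: rest).length)]
      simp only [pvAcrossRow, List.getD_cons_zero]
      split_ifs with h
      · rfl
      · have hsh : pvRunA (ch :: rest) 1 (rest.length + 1) = pvRunA rest 0 rest.length :=
          pvRunA_shift ch rest rest.length 0 rest.length (by omega)
        simp only [List.length_cons, hsh, pv_headD_getD, ih 0]
    | succ c =>
      simp only [pvAcrossRow, List.getD_cons_succ, ih c, List.length_cons]
      exact (pvRunA_shift ch rest rest.length c rest.length (by omega)).symm

-- down-table facts
theorem pvCell_cons (row : List Char) (rest : List (List Char)) (r c : Nat) :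
    pvCell (row :: rest) (r+1) c = pvCell rest r c := by
  simp [pvCell]

theorem pvRunD_shift (row : List Char) (rest : List (List Char)) (c : Nat) :
    ∀ (n r h : Nat), h - r ≤ n → pvRunD (row :: rest) (r+1) c (h+1) = pvRunD rest r c h := by
  intro n
  induction n with
  | zero =>
    intro r h hh
    conv_lhs => rw [pvRunD_eq]
    conv_rhs => rw [pvRunD_eq]
    rw [if_neg (by omega), if_neg (by omega)]
  | succ n ih =>
    intro r h hh
    conv_lhs => rw [pvRunD_eq]
    conv_rhs => rw [pvRunD_eq]
    by_cases hr : r < h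
    · rw [if_pos (by omega : r + 1 < h + 1), if_pos hr, pvCell_cons, ih (r+1) h (by omega)]
    · rw [if_neg (by omega), if_neg hr]

theorem pvRunD_congr (g1 g2 : List (List Char)) (c h : Nat)
    (hcell : ∀ i, pvCell g1 i c = pvCell g2 i c) :
    ∀ (n r : Nat), h - r ≤ n → pvRunD g1 r c h = pvRunD g2 r c h := by
  intro n
  induction n with
  | zero =>
    intro r hh
    conv_lhs => rw [pvRunD_eq]
    conv_rhs => rw [pvRunD_eq]
    rw [if_neg (by omega), if_neg (by omega)]
  | succ n ih =>
    intro r hh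
    conv_lhs => rw [pvRunD_eq]
    conv_rhs => rw [pvRunD_eq]
    by_cases hr : r < h
    · rw [if_pos hr, if_pos hr, hcell r, ih (r+1) (by omega)]
    · rw [if_neg hr, if_neg hr]

theorem pvRunD_pos (g : List (List Char)) (r c h : Nat) :
    1 ≤ pvRunD g r c h ↔ (r < h ∧ pvCell g r c ≠ '.') := by
  rw [pvRunD_eq]
  by_cases h1 : r < h
  · rw [if_pos h1]
    by_cases h2 : pvCell g r c = '.'
    · rw [if_pos h2]; simp [h1, h2]
    · rw [if_neg h2]; simp [h1, h2]
  · rw [if_neg h1]; simp [h1]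

theorem pv_downTable_getD (rs : List (List Char)) :
    ∀ (r c : Nat), r < rs.length → (∀ l ∈ rs, c < l.length) →
    ((pvDownTable rs).getD r []).getD c 0 = pvRunD rs r c rs.length := by
  induction rs with
  | nil => intro r c hr _; simp at hr
  | cons row rest ih =>
    intro r c hr hc
    cases r with
    | zero =>
      have hcr : c < row.length := hc row (by simp)
      rw [pvRunD_eq, if_pos (by simp : 0 < (row :: rest).length)]
      simp only [pvDownTable, List.getD_cons_zero]
      rw [List.getD, List.getElem?_map, List.getElem?_range hcr]
      simp only [Option.map_some, Option.getD_some]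
      have hcell0 : pvCell (row :: rest) 0 c = row.getD c ' ' := rfl
      rw [hcell0]
      split_ifs with h
      · rfl
      · have hshift : pvRunD (row :: rest) 1 c (rest.length + 1) = pvRunD rest 0 c rest.length :=
          pvRunD_shift row rest c rest.length 0 rest.length (by omega)
        simp only [List.length_cons, hshift]
        congr 1
        rw [pv_headD_getD]
        cases rest with
        | nil =>
          rw [pvRunD_eq, if_neg (by simp)]
          simp [pvDownTable, List.getD]
        | cons row2 rest2 =>
          exact ih 0 c (by simp) (fun l hl => hc l (by simp [hl]))
    | succ r =>
      simp only [pvDownTable, List.getD_cons_succ, List.length_cons]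
      rw [ih r c (by simpa using hr) (fun l hl => hc l (by simp [hl]))]
      exact (pvRunD_shift row rest c rest.length r rest.length (by omega)).symm

theorem pv_cellB (g : List (List Char)) (width r c : Nat) (hc : c < width) :
    ((g.map (fun l => l.take width)).getD r []).getD c ' ' = pvCell g r c := by
  rw [pv_map_getD_nil (fun l => l.take width) (by simp)]
  exact pv_take_getD _ _ _ hc

theorem pv_av_eq (g : List (List Char)) (width r c : Nat) (hc : c < width)
    (hr : r < g.length) (hlen : ∀ l ∈ g, width ≤ l.length) :
    (((g.map (fun l => l.take width)).map pvAcrossRow).getD r []).getD c 0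
      = pvRunA (g.getD r []) c width := by
  rw [pv_map_getD_nil pvAcrossRow rfl, pv_map_getD_nil (fun l => l.take width) (by simp)]
  have hrowlen : width ≤ (g.getD r []).length := by
    have : g.getD r [] ∈ g := by
      rw [List.getD_eq_getElem?_getD, List.getElem?_eq_getElem hr]
      exact List.getElem_mem hr
    exact hlen _ this
  have htake : ((g.getD r []).take width).length = width := by
    rw [List.length_take]; omega
  rw [pv_acrossRow_getD, htake]
  exact pvRunA_congr width _ _ (fun i hi => pv_take_getD _ _ _ hi) width c (by omega)

theorem pv_dv_eq (g : List (List Char)) (width r c : Nat) (hc : c < width)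
    (hr : r < g.length) (hlen : ∀ l ∈ g, width ≤ l.length) :
    ((pvDownTable (g.map (fun l => l.take width))).getD r []).getD c 0
      = pvRunD g r c g.length := by
  have hlens : ∀ l ∈ g.map (fun l => l.take width), c < l.length := by
    intro l hl
    rcases List.mem_map.mp hl with ⟨l0, hl0, rfl⟩
    simp [List.length_take]
    exact ⟨hc, lt_of_lt_of_le hc (hlen l0 hl0)⟩
  rw [pv_downTable_getD _ r c (by simpa using hr) hlens]
  have hcell : ∀ i, pvCell (g.map (fun l => l.take width)) i c = pvCell g i c := by
    intro i
    exact pv_cellB g width i c hc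
  have hlg : (g.map (fun l => l.take width)).length = g.length := by simp
  rw [hlg]
  exact pvRunD_congr _ _ c g.length hcell g.length r (by omega)

theorem pv_step_eq (g : List (List Char)) (width height : Nat) (hheight : height = g.length)
    (hlen : ∀ l ∈ g, width ≤ l.length) (r c : Nat) (hr : r < g.length) (hc : c < width)
    (st : PySem.Dict Int (List (Int × Int × String × Int)) × Int)
    (hinv : ∀ k ∈ st.1.keys, k < st.2) :
    pvStepA g width height r c st
      = pvStepB (g.map (fun l => l.take width))
          ((g.map (fun l => l.take width)).map pvAcrossRow)
          (pvDownTable (g.map (fun l => l.take width))) r c st := by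
  subst hheight
  simp only [pvStepA, pvStepB]
  rw [pv_cellB g width r c hc, pv_cellB g width r (c-1) (by omega),
      pv_cellB g width (r-1) c hc,
      pv_av_eq g width r c hc hr hlen, pv_dv_eq g width r c hc hr hlen]
  by_cases hdot : pvCell g r c = '.'
  · rw [if_pos hdot, if_pos hdot]
  · rw [if_neg hdot, if_neg hdot]
    have hsa2 : (decide (c+1 < width) && (pvCell g r (c+1) != '.'))
        = decide (2 ≤ pvRunA (g.getD r []) c width) := by
      have hdot' : ¬ (g.getD r []).getD c ' ' = '.' := hdot
      have hrw : pvRunA (g.getD r []) c width = pvRunA (g.getD r []) (c+1) width + 1 := by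
        rw [pvRunA_eq, if_pos hc, if_neg hdot']
      rw [hrw]
      by_cases hx : c + 1 < width <;> by_cases hy : (g.getD r []).getD (c+1) ' ' = '.'
      · have h0 : pvRunA (g.getD r []) (c+1) width = 0 := by
          rw [pvRunA_eq, if_pos hx, if_pos hy]
        have hz : ¬ (2 ≤ pvRunA (g.getD r []) (c+1) width + 1) := by omega
        have hcl : pvCell g r (c+1) = '.' := hy
        rw [hcl, decide_eq_false hz]
        simp
      · have h1 : 1 ≤ pvRunA (g.getD r []) (c+1) width :=
          (pvRunA_pos _ _ _).mpr ⟨hx, hy⟩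
        have hz : 2 ≤ pvRunA (g.getD r []) (c+1) width + 1 := by omega
        have hcl : pvCell g r (c+1) ≠ '.' := hy
        rw [decide_eq_true hz]
        simp [hx, bne_iff_ne, hcl]
      · have h0 : pvRunA (g.getD r []) (c+1) width = 0 := by
          rw [pvRunA_eq, if_neg hx]
        have hz : ¬ (2 ≤ pvRunA (g.getD r []) (c+1) width + 1) := by omega
        rw [decide_eq_false hz]
        simp [hx]
      · have h0 : pvRunA (g.getD r []) (c+1) width = 0 := by
          rw [pvRunA_eq, if_neg hx]
        have hz : ¬ (2 ≤ pvRunA (g.getD r []) (c+1) width + 1) := by omega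
        rw [decide_eq_false hz]
        simp [hx]
    have hsd2 : (decide (r+1 < g.length) && (pvCell g (r+1) c != '.'))
        = decide (2 ≤ pvRunD g r c g.length) := by
      have hrw : pvRunD g r c g.length = pvRunD g (r+1) c g.length + 1 := by
        rw [pvRunD_eq, if_pos hr, if_neg hdot]
      rw [hrw]
      by_cases hx : r + 1 < g.length <;> by_cases hy : pvCell g (r+1) c = '.'
      · have h0 : pvRunD g (r+1) c g.length = 0 := by
          rw [pvRunD_eq, if_pos hx, if_pos hy]
        have hz : ¬ (2 ≤ pvRunD g (r+1) c g.length + 1) := by omega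
        rw [hy, decide_eq_false hz]
        simp
      · have h1 : 1 ≤ pvRunD g (r+1) c g.length :=
          (pvRunD_pos _ _ _ _).mpr ⟨hx, hy⟩
        have hz : 2 ≤ pvRunD g (r+1) c g.length + 1 := by omega
        rw [decide_eq_true hz]
        simp [hx, bne_iff_ne, hy]
      · have h0 : pvRunD g (r+1) c g.length = 0 := by
          rw [pvRunD_eq, if_neg hx]
        have hz : ¬ (2 ≤ pvRunD g (r+1) c g.length + 1) := by omega
        rw [decide_eq_false hz]
        simp [hx]
      · have h0 : pvRunD g (r+1) c g.length = 0 := by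
          rw [pvRunD_eq, if_neg hx]
        have hz : ¬ (2 ≤ pvRunD g (r+1) c g.length + 1) := by omega
        rw [decide_eq_false hz]
        simp [hx]
    rw [← hsa2, ← hsd2, Bool.and_assoc, Bool.and_assoc]
    have hfresh : st.1.contains st.2 = false := by
      by_contra hcon
      rw [Bool.not_eq_false, PySem.Dict.contains_iff_mem_keys] at hcon
      exact absurd (hinv _ hcon) (lt_irrefl _)
    split_ifs with h1 h2 h3 <;>
      simp_all [PySem.Dict.getD_insert_self, PySem.Dict.insert_insert_self]

theorem pvStepB_inv (rows : List (List Char)) (acr dwn : List (List Nat)) (r c : Nat)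
    (st : PySem.Dict Int (List (Int × Int × String × Int)) × Int)
    (hinv : ∀ k ∈ st.1.keys, k < st.2) :
    ∀ k ∈ (pvStepB rows acr dwn r c st).1.keys, k < (pvStepB rows acr dwn r c st).2 := by
  simp only [pvStepB]
  split_ifs <;> (try exact hinv) <;>
    (intro k hk
     rw [PySem.Dict.mem_keys_insert] at hk
     rcases hk with rfl | h
     · omega
     · have := hinv _ h; omega)

theorem pv_inner (g : List (List Char)) (width height : Nat) (hheight : height = g.length)
    (hlen : ∀ l ∈ g, width ≤ l.length) (r : Nat) (hr : r < g.length) :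
    ∀ (cs : List Nat) (st : PySem.Dict Int (List (Int × Int × String × Int)) × Int),
      (∀ c ∈ cs, c < width) → (∀ k ∈ st.1.keys, k < st.2) →
      (cs.foldl (fun st c => pvStepA g width height r c st) st
        = cs.foldl (fun st c => pvStepB (g.map (fun l => l.take width))
            ((g.map (fun l => l.take width)).map pvAcrossRow)
            (pvDownTable (g.map (fun l => l.take width))) r c st) st)
      ∧ (∀ k ∈ (cs.foldl (fun st c => pvStepB (g.map (fun l => l.take width))
            ((g.map (fun l => l.take width)).map pvAcrossRow)
            (pvDownTable (g.map (fun l => l.take width))) r c st) st).1.keys,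
          k < (cs.foldl (fun st c => pvStepB (g.map (fun l => l.take width))
            ((g.map (fun l => l.take width)).map pvAcrossRow)
            (pvDownTable (g.map (fun l => l.take width))) r c st) st).2) := by
  intro cs
  induction cs with
  | nil => exact fun st _ hinv => ⟨rfl, hinv⟩
  | cons c cs ih =>
    intro st hcs hinv
    rw [List.foldl_cons, List.foldl_cons,
      pv_step_eq g width height hheight hlen r c hr (hcs c (by simp)) st hinv]
    exact ih _ (fun c' h => hcs c' (by simp [h])) (pvStepB_inv _ _ _ _ _ _ hinv)

theorem pv_outer (g : List (List Char)) (width height : Nat) (hheight : height = g.length)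
    (hlen : ∀ l ∈ g, width ≤ l.length) :
    ∀ (rs : List Nat) (st : PySem.Dict Int (List (Int × Int × String × Int)) × Int),
      (∀ r ∈ rs, r < g.length) → (∀ k ∈ st.1.keys, k < st.2) →
      (rs.foldl (fun st r => (List.range width).foldl
          (fun st c => pvStepA g width height r c st) st) st
        = rs.foldl (fun st r => (List.range width).foldl
            (fun st c => pvStepB (g.map (fun l => l.take width))
              ((g.map (fun l => l.take width)).map pvAcrossRow)
              (pvDownTable (g.map (fun l => l.take width))) r c st) st) st)
      ∧ (∀ k ∈ (rs.foldl (fun st r => (List.range width).foldl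
            (fun st c => pvStepB (g.map (fun l => l.take width))
              ((g.map (fun l => l.take width)).map pvAcrossRow)
              (pvDownTable (g.map (fun l => l.take width))) r c st) st) st).1.keys,
          k < (rs.foldl (fun st r => (List.range width).foldl
            (fun st c => pvStepB (g.map (fun l => l.take width))
              ((g.map (fun l => l.take width)).map pvAcrossRow)
              (pvDownTable (g.map (fun l => l.take width))) r c st) st) st).2) := by
  intro rs
  induction rs with
  | nil => exact fun st _ hinv => ⟨rfl, hinv⟩
  | cons r rs ih =>
    intro st hrs hinv
    have hinner := pv_inner g width height hheight hlen r (hrs r (by simp))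
      (List.range width) st (fun c hc => List.mem_range.mp hc) hinv
    rw [List.foldl_cons, List.foldl_cons, hinner.1]
    exact ih _ (fun r' h => hrs r' (by simp [h])) hinner.2

theorem pv_main : ∀ (grid : List String), Pre_find_clue_positions grid →
    find_clue_positions grid = find_clue_positions_alt grid := by
  intro grid hpre
  cases grid with
  | nil => rfl
  | cons s rest =>
    simp only [find_clue_positions, find_clue_positions_alt]
    have hrows : (s :: rest).map (fun t => t.toList.take s.toList.length)
        = ((s :: rest).map String.toList).map (fun l => l.take s.toList.length) := by
      simp [List.map_map, Function.comp]
    rw [hrows]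
    have hlen : ∀ l ∈ (s :: rest).map String.toList, s.toList.length ≤ l.length := by
      intro l hl
      rcases List.mem_map.mp hl with ⟨t, ht, rfl⟩
      simpa using hpre t ht
    have hinv0 : ∀ k ∈ (PySem.Dict.empty :
        PySem.Dict Int (List (Int × Int × String × Int))).keys, k < (1 : Int) := by
      intro k hk
      simp [PySem.Dict.keys_empty] at hk
    have h := pv_outer ((s :: rest).map String.toList) s.toList.length (s :: rest).length
      (by simp) hlen (List.range (s :: rest).length)
      (PySem.Dict.empty, (1 : Int))
      (fun r hr => by simpa using List.mem_range.mp hr) hinv0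
    rw [h.1]


-- ===== VERDICT (by name: the statement is the Claim_ definition above) =====
theorem find_clue_positions_spec : Claim_equal_find_clue_positions := by
  intro grid _hdom hpre
  unfold Spec_find_clue_positions
  exact pv_main grid hpre
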